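-- pv_equiv track=rewrite | github.com/iLuigi98/UCSD-DSC20 | Labs/lab06.py | how_many_77
-- ===== SOURCE A (Python) =====
-- def how_many_77(number):
--     """ Counts the number of 77 occurnces in a number
--     >>> how_many_77(77)
--     1
--     >>> how_many_77(7707)
--     1
--     >>> how_many_77(70707)
--     0
--     >>> how_many_77(0)
--     0
--     >>> how_many_77(777)
--     1
--     >>> how_many_77(7777)
--     2
--     """
--     next_number = number // 10
--     next_next_number = next_number // 10
--     if number <= 0:
--     	return 0
--     elif number % 10==7 and next_number % 10==7:
--     	return 1 + how_many_77(next_next_number)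
--     else:
--     	return 0 + how_many_77(next_number)
-- ===== SOURCE B (Python) =====
-- def how_many_77(number):
--     if number <= 0:
--         return 0
--     return str(number).count("77")
-- ===== Notes on version B (the rewrite author's own statement) =====
-- stated objective: idiomatic
-- what changed: Replaces the per-digit recursion with a conversion to the decimal string and Python's non-overlapping str.count('77'), which coincides with the greedy right-to-left pair count for a single repeated digit.
import Mathlib
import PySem

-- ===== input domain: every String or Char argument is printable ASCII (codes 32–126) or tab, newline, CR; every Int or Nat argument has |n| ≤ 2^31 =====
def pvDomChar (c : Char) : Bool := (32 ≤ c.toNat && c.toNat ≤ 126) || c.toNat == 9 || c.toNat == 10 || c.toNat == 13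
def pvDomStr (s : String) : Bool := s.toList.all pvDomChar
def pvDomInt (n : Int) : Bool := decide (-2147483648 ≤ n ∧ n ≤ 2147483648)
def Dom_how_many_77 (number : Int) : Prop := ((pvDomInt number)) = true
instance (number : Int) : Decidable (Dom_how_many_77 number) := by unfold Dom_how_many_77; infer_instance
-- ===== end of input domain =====

-- B replaces A's per-digit recursion by counting "77" in the decimal string (idiomatic; same cost).

-- ===== PORT A =====
def how_many_77 (number : Int) : Int :=
  let next_number := PySem.Int.floordiv number 10
  let next_next_number := PySem.Int.floordiv next_number 10
  if number ≤ 0 then 0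
  else if PySem.Int.mod number 10 = 7 ∧ PySem.Int.mod next_number 10 = 7 then
    1 + how_many_77 next_next_number
  else
    0 + how_many_77 next_number
termination_by number.toNat
decreasing_by
  · have h1 : PySem.Int.floordiv number 10 = number / 10 :=
      PySem.Int.floordiv_eq_ediv_of_pos (by omega)
    have h2 : PySem.Int.floordiv (number / 10) 10 = (number / 10) / 10 :=
      PySem.Int.floordiv_eq_ediv_of_pos (by omega)
    simp only [h1, h2]
    omega
  · have h1 : PySem.Int.floordiv number 10 = number / 10 :=
      PySem.Int.floordiv_eq_ediv_of_pos (by omega)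
    simp only [h1]
    omega

-- ===== PORT B =====
def how_many_77_alt (number : Int) : Int :=
  if number ≤ 0 then 0
  else (PySem.Str.count (PySem.Int.toStr number) "77" : Int)

-- ===== PRECONDITION & SPEC =====
def Spec_how_many_77 (number : Int) (out : Int) : Prop := out = how_many_77_alt number
instance (number : Int) (out : Int) : Decidable (Spec_how_many_77 number out) := by unfold Spec_how_many_77; infer_instance

-- ===== CLAIM (what is proved, stated in full; the proofs are below) =====
def Claim_equal_how_many_77 : Prop := ∀ (number : Int), Dom_how_many_77 number → Spec_how_many_77 number (how_many_77 number)

-- ===== LEMMAS AND PROOFS =====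

/-- Greedy left-to-right non-overlapping count of the pair `'7','7'`. -/
def pvL : List Char → Nat
  | [] => 0
  | [_] => 0
  | a :: b :: t => if a = '7' ∧ b = '7' then pvL t + 1 else pvL (b :: t)

/-- Greedy count of the pair `7,7` over a digit list (A reads digits least-significant first). -/
def pvR : List Nat → Nat
  | [] => 0
  | [_] => 0
  | a :: b :: t => if a = 7 ∧ b = 7 then pvR t + 1 else pvR (b :: t)

/-- One step of the pair-counting automaton: (count, pending 7). -/
def pvStep : Nat × Bool → Char → Nat × Bool
  | (c, p), ch => if ch = '7' then (if p then (c + 1, false) else (c, true)) else (c, false)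

theorem pvL_fold : ∀ (l : List Char) (c : Nat), (l.foldl pvStep (c, false)).1 = c + pvL l := by
  intro l
  induction l using pvL.induct with
  | case1 => intro c; simp [pvL]
  | case2 a => intro c; by_cases h : a = '7' <;> simp [pvL, pvStep, h]
  | case3 a b t hab ih =>
    intro c
    obtain ⟨ha, hb⟩ := hab
    subst ha hb
    simp [pvL, pvStep, List.foldl, ih]
    omega
  | case4 a b t hab ih =>
    intro c
    rw [pvL]
    simp only [if_neg hab]
    by_cases ha : a = '7'
    · subst ha
      have hb : b ≠ '7' := by intro hb; exact hab ⟨rfl, hb⟩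
      have h1 := ih c
      rw [List.foldl_cons] at h1
      simp only [pvStep, if_neg hb] at h1
      rw [List.foldl_cons, List.foldl_cons]
      simp only [pvStep, if_neg hb]
      exact h1
    · rw [List.foldl_cons]
      simp only [pvStep, if_neg ha]
      exact ih c

theorem pv_go_eq : ∀ (fuel : Nat) (l : List Char) (acc : Nat), l.length ≤ fuel →
    PySem.Chars.count.go ['7', '7'] fuel l acc = acc + pvL l := by
  intro fuel
  induction fuel with
  | zero =>
    intro l acc h
    have : l = [] := by cases l <;> simp_all
    subst this
    simp [PySem.Chars.count.go, pvL]
  | succ f ih =>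
    intro l acc h
    cases l with
    | nil => simp [PySem.Chars.count.go, pvL]
    | cons a t =>
      rw [PySem.Chars.count.go]
      by_cases hp : List.isPrefixOf ['7', '7'] (a :: t) = true
      · rw [if_pos hp]
        obtain ⟨b, t', rfl⟩ : ∃ b t', t = b :: t' := by
          cases t with
          | nil => simp [List.isPrefixOf] at hp
          | cons b t' => exact ⟨b, t', rfl⟩
        have h7 : a = '7' ∧ b = '7' := by
          have := hp
          simp [List.isPrefixOf] at this
          exact ⟨this.1.symm, this.2.symm⟩
        obtain ⟨rfl, rfl⟩ := h7
        simp only [List.length, List.drop]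
        rw [ih t' (acc + 1) (by simp at h; omega)]
        rw [pvL, if_pos ⟨rfl, rfl⟩]
        omega
      · rw [if_neg hp]
        rw [ih t acc (by simp at h; omega)]
        congr 1
        cases t with
        | nil => rfl
        | cons b t' =>
          rw [pvL, if_neg]
          rintro ⟨rfl, rfl⟩
          simp [List.isPrefixOf] at hp

theorem pv_pending_false (l : List Char) (ch : Char) (s : Nat × Bool) (h : ch ≠ '7') :
    ((l ++ [ch]).foldl pvStep s).2 = false := by
  rw [List.foldl_append]
  simp [pvStep, h]


theorem pv_digitChar_ne {a : Nat} (ha : a < 10) (h : a ≠ 7) : Nat.digitChar a ≠ '7' := by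
  interval_cases a <;> simp_all <;> decide


theorem pv_pair_fold (s : Nat × Bool) : (List.foldl pvStep s ['7', '7']).1 = s.1 + 1 := by
  obtain ⟨c, p⟩ := s
  cases p <;> simp [pvStep]


theorem pvM : ∀ (n : Nat) (ds : List Nat), ds.length ≤ n → (∀ d ∈ ds, d < 10) → ∀ (c : Nat),
    ((ds.reverse.map Nat.digitChar).foldl pvStep (c, false)).1 = c + pvR ds := by
  intro n
  induction n with
  | zero =>
    intro ds h _ c
    have : ds = [] := by cases ds <;> simp_all
    subst this; simp [pvR]
  | succ m ih =>
    intro ds hlen hd c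
    match ds with
    | [] => simp [pvR]
    | [a] =>
      by_cases h : Nat.digitChar a = '7' <;> simp [pvR, pvStep, h]
    | a :: b :: t =>
      have hrev : ((a :: b :: t).reverse.map Nat.digitChar)
          = ((b :: t).reverse.map Nat.digitChar) ++ [Nat.digitChar a] := by
        simp
      rw [hrev, List.foldl_append]
      have ha10 : a < 10 := hd a (by simp)
      have hb10 : b < 10 := hd b (by simp)
      by_cases hab : a = 7 ∧ b = 7
      · obtain ⟨rfl, rfl⟩ := hab
        rw [pvR, if_pos ⟨rfl, rfl⟩]
        have hrev2 : (((7:Nat) :: t).reverse.map Nat.digitChar)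
            = (t.reverse.map Nat.digitChar) ++ [Nat.digitChar 7] := by simp
        rw [hrev2, List.foldl_append]
        have hcomb : ∀ (s : Nat × Bool), List.foldl pvStep (List.foldl pvStep s [Nat.digitChar 7]) [Nat.digitChar 7]
            = List.foldl pvStep s ['7', '7'] := by intro s; rfl
        rw [hcomb, pv_pair_fold]
        rw [ih t (by simp at hlen ⊢; omega) (fun d hdm => hd d (by simp [hdm])) c]
        omega
      · rw [pvR, if_neg hab]
        rcases hEq : List.foldl pvStep (c, false) (List.map Nat.digitChar (b :: t).reverse) with ⟨cnt, p⟩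
        have hv := ih (b :: t) (by simp at hlen ⊢; omega) (fun d hdm => hd d (by simp [hdm])) c
        rw [hEq] at hv
        simp only [List.foldl_cons, List.foldl_nil]
        by_cases ha : a = 7
        · subst ha
          have hb : b ≠ 7 := fun hb => hab ⟨rfl, hb⟩
          have hpend : p = false := by
            have h2 : ((b :: t).reverse.map Nat.digitChar)
                = (t.reverse.map Nat.digitChar) ++ [Nat.digitChar b] := by simp
            have h3 := pv_pending_false (t.reverse.map Nat.digitChar) (Nat.digitChar b) ((c, false) : Nat × Bool)
              (pv_digitChar_ne hb10 hb)
            rw [← h2] at h3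
            rw [hEq] at h3
            exact h3
          subst hpend
          have h7 : Nat.digitChar 7 = '7' := rfl
          rw [h7]
          simp only [pvStep]
          exact hv
        · have hchar := pv_digitChar_ne ha10 ha
          simp only [pvStep, if_neg hchar]
          exact hv

theorem pvTD : ∀ (fuel n : Nat) (ds : List Char), 0 < n → n < fuel →
    Nat.toDigitsCore 10 fuel n ds = (Nat.digits 10 n).reverse.map Nat.digitChar ++ ds := by
  intro fuel
  induction fuel with
  | zero => intro n ds h hf; omega
  | succ f ih =>
    intro n ds hn hf
    have hstep : Nat.toDigitsCore 10 (f + 1) n ds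
        = if n / 10 = 0 then (n % 10).digitChar :: ds
          else Nat.toDigitsCore 10 f (n / 10) ((n % 10).digitChar :: ds) := rfl
    rw [hstep]
    by_cases h : n / 10 = 0
    · rw [if_pos h]
      have hlt : n < 10 := by omega
      rw [Nat.digits_def' (by norm_num : (1:Nat) < 10) hn, h]
      simp [Nat.mod_eq_of_lt hlt]
    · rw [if_neg h]
      rw [ih (n / 10) _ (by omega) (by omega)]
      rw [Nat.digits_def' (by norm_num : (1:Nat) < 10) hn]
      simp


theorem pvR_cons_ne (d : Nat) (t : List Nat) (h : ¬ (d = 7 ∧ t.head? = some 7)) :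
    pvR (d :: t) = pvR t := by
  cases t with
  | nil => simp [pvR]
  | cons b t' =>
    rw [pvR, if_neg]
    rintro ⟨rfl, rfl⟩
    exact h ⟨rfl, rfl⟩

theorem pvA_eq : ∀ (m : Nat) (n : Int), n.toNat ≤ m → 0 ≤ n →
    how_many_77 n = (pvR (Nat.digits 10 n.toNat) : Int) := by
  intro m
  induction m with
  | zero =>
    intro n h hpos
    have hn0 : n = 0 := by omega
    subst hn0
    rw [how_many_77]
    simp [pvR]
  | succ m ih =>
    intro n h hpos
    by_cases hz : n ≤ 0
    · have hn0 : n = 0 := by omega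
      subst hn0
      rw [how_many_77]
      simp [pvR]
    · have hpos' : 0 < n := by omega
      have hfd : PySem.Int.floordiv n 10 = n / 10 :=
        PySem.Int.floordiv_eq_ediv_of_pos (by omega)
      have hfd2 : PySem.Int.floordiv (n / 10) 10 = n / 10 / 10 :=
        PySem.Int.floordiv_eq_ediv_of_pos (by omega)
      have hmod : PySem.Int.mod n 10 = n % 10 :=
        PySem.Int.mod_eq_emod_of_pos (by omega)
      have hmod2 : PySem.Int.mod (n / 10) 10 = (n / 10) % 10 :=
        PySem.Int.mod_eq_emod_of_pos (by omega)
      have hNpos : 0 < n.toNat := by omega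
      have hdig : Nat.digits 10 n.toNat = n.toNat % 10 :: Nat.digits 10 (n.toNat / 10) :=
        Nat.digits_def' (by norm_num) hNpos
      rw [how_many_77]
      simp only [if_neg hz, hfd, hfd2, hmod, hmod2]
      have hcast1 : n % 10 = ((n.toNat % 10 : Nat) : Int) := by omega
      have hcast2 : (n / 10) % 10 = ((n.toNat / 10 % 10 : Nat) : Int) := by omega
      have htn1 : (n / 10).toNat = n.toNat / 10 := by omega
      by_cases hpair : n % 10 = 7 ∧ (n / 10) % 10 = 7
      · rw [if_pos hpair]
        have h7a : n.toNat % 10 = 7 := by omega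
        have h7b : n.toNat / 10 % 10 = 7 := by omega
        have hq : 0 < n.toNat / 10 := by omega
        have hdig2 : Nat.digits 10 (n.toNat / 10)
            = n.toNat / 10 % 10 :: Nat.digits 10 (n.toNat / 10 / 10) :=
          Nat.digits_def' (by norm_num) hq
        rw [hdig, hdig2, h7a, h7b, pvR, if_pos ⟨rfl, rfl⟩]
        have htn2 : (n / 10 / 10).toNat = n.toNat / 10 / 10 := by omega
        rw [ih (n / 10 / 10) (by omega) (by omega), htn2]
        push_cast
        ring
      · rw [if_neg hpair]
        rw [ih (n / 10) (by omega) (by omega), htn1]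
        rw [hdig, pvR_cons_ne]
        · ring
        · rintro ⟨h7a, hh⟩
          apply hpair
          constructor
          · omega
          · by_cases hq : 0 < n.toNat / 10
            · rw [Nat.digits_def' (by norm_num : (1:Nat) < 10) hq] at hh
              simp at hh
              omega
            · have : n.toNat / 10 = 0 := by omega
              rw [this] at hh
              simp at hh

theorem pvB_eq (n : Int) (h : 0 < n) :
    how_many_77_alt n = (pvR (Nat.digits 10 n.toNat) : Int) := by
  rw [how_many_77_alt, if_neg (by omega : ¬ n ≤ 0)]
  congr 1
  rw [PySem.Str.count]
  have h77 : ("77" : String).toList = ['7', '7'] := by decide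
  rw [h77, PySem.Int.toList_toStr]
  rw [PySem.Int.toChars, if_neg (by omega : ¬ n < 0)]
  have hNpos : 0 < n.toNat := by omega
  rw [Nat.toDigits, pvTD (n.toNat + 1) n.toNat [] hNpos (by omega), List.append_nil]
  rw [PySem.Chars.count]
  rw [if_neg (by decide)]
  rw [pv_go_eq _ _ _ le_rfl, Nat.zero_add]
  have hfold := pvL_fold ((Nat.digits 10 n.toNat).reverse.map Nat.digitChar) 0
  have hM := pvM (Nat.digits 10 n.toNat).length (Nat.digits 10 n.toNat) le_rfl
    (fun d hd => Nat.digits_lt_base (by norm_num) hd) 0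
  omega

-- ===== VERDICT (by name: the statement is the Claim_ definition above) =====
theorem how_many_77_spec : Claim_equal_how_many_77 := by
  intro n _
  unfold Spec_how_many_77
  by_cases h : n ≤ 0
  · rw [how_many_77, how_many_77_alt]
    simp [h]
  · rw [pvA_eq n.toNat n le_rfl (by omega), pvB_eq n (by omega)]
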